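-- pv_equiv track=rewrite | github.com/Aakash02A/Cryptography-Algorithm | Modules/Post_Quantum_Cryptography/Key_Encapsulation_or_Encryption/ntru.py | _poly_inv_modq
-- ===== SOURCE A (Python) =====
-- _N   = 677    # NTRU-HPS-2048-677 ring degree
--
-- _Q   = 2048   # ciphertext modulus
--
-- def _poly_sub(a: list[int], b: list[int], mod: int | None = None) -> list[int]:
--     c = [(x - y) for x, y in zip(a, b)]
--     if mod:
--         c = [x % mod for x in c]
--     return c
--
-- def _poly_mul(a: list[int], b: list[int], mod: int | None = None) -> list[int]:
--     n = len(a)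
--     c = [0] * n
--     for i in range(n):
--         if a[i] == 0:
--             continue
--         for j in range(n):
--             c[(i + j) % n] += a[i] * b[j]
--     if mod:
--         c = [x % mod for x in c]
--     return c
--
-- def _poly_inv_modq(f_inv2: list[int], f: list[int]) -> list[int]:
--     """Lift f^{-1} mod 2 to f^{-1} mod q=2048 via repeated squaring (Hensel)."""
--     e = f_inv2[:]
--     mod = 2
--     while mod < _Q:
--         mod = min(mod * mod, _Q)
--         # e = e * (2 - f*e) mod current_mod
--         fe  = _poly_mul(f, e, mod)
--         two = [2] + [0]*(_N-1)
--         two_minus_fe = _poly_sub(two, fe, mod)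
--         e = _poly_mul(e, two_minus_fe, mod)
--         e = [x % mod for x in e]
--     return e
-- ===== SOURCE B (Python) =====
-- # Karatsuba-based lift: each cyclic convolution is done as a divide-and-conquer
-- # Karatsuba linear product folded back into the ring, instead of A's scatter
-- # double loop; the modulus schedule is unrolled to (4, 16, 256, 2048).
--
-- def _padd(u, v):
--     L = max(len(u), len(v))
--     return [(u[i] if i < len(u) else 0) + (v[i] if i < len(v) else 0) for i in range(L)]
--
-- def _psub(u, v):
--     L = max(len(u), len(v))
--     return [(u[i] if i < len(u) else 0) - (v[i] if i < len(v) else 0) for i in range(L)]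
--
-- def _school(a, b):
--     la, lb = len(a), len(b)
--     if la == 0 or lb == 0:
--         return []
--     return [sum(a[i] * b[k - i] for i in range(k + 1) if i < la and k - i < lb)
--             for k in range(la + lb - 1)]
--
-- def _kara(a, b):
--     la, lb = len(a), len(b)
--     if la <= 32 or lb <= 32:
--         return _school(a, b)
--     h = min(la, lb) // 2
--     a0, a1 = a[:h], a[h:]
--     b0, b1 = b[:h], b[h:]
--     p0 = _kara(a0, b0)
--     p2 = _kara(a1, b1)
--     p1 = _kara(_padd(a0, a1), _padd(b0, b1))
--     mid = _psub(_psub(p1, p0), p2)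
--     return [(p0[k] if k < len(p0) else 0)
--             + (mid[k - h] if h <= k < h + len(mid) else 0)
--             + (p2[k - 2 * h] if 2 * h <= k < 2 * h + len(p2) else 0)
--             for k in range(la + lb - 1)]
--
-- def _cyc(a, b, n, m):
--     c = _kara(a, b)
--     return [((c[k] if k < len(c) else 0) + (c[k + n] if k + n < len(c) else 0)) % m
--             for k in range(n)]
--
-- def _poly_inv_modq(f_inv2: list[int], f: list[int]) -> list[int]:
--     e = list(f_inv2)
--     n = len(f)
--     for m in (4, 16, 256, 2048):
--         fe = _cyc(f, e, n, m)
--         t = [((2 if k == 0 else 0) - x) % m for k, x in enumerate(fe)]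
--         e = _cyc(e, t, n, m)
--     return e
-- ===== Notes on version B (the rewrite author's own statement) =====
-- stated objective: alternative
-- what changed: Replaces A's O(n^2) scatter-accumulate cyclic convolution with a divide-and-conquer Karatsuba linear product (threshold 32) whose result is folded back into the cyclic ring, over the unrolled modulus schedule (4, 16, 256, 2048).
-- outside the precondition, e.g. on _poly_inv_modq([0, 0], [0]): A returns [0, 0], B returns [0]
import Mathlib
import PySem

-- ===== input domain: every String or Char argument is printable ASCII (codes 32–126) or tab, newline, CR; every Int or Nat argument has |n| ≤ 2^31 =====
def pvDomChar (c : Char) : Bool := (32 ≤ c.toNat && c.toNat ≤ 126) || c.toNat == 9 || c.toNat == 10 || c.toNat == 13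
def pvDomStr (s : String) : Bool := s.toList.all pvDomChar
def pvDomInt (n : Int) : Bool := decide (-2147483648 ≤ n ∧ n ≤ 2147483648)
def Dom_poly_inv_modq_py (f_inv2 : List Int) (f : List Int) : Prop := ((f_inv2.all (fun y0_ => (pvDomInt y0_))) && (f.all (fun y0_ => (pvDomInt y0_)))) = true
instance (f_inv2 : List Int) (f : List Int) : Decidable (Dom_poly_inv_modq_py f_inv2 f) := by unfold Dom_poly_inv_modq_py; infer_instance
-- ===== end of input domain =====

-- B replaces A's scatter-accumulate cyclic convolutions by Karatsuba
-- divide-and-conquer linear products folded back into the ring (alternative algorithm).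

-- ===== PORT A =====
-- the c of _poly_sub: [(x - y) for x, y in zip(a, b)]
def subCore (a b : List Int) : List Int := (a.zip b).map (fun p => p.1 - p.2)

-- _poly_sub(a, b, mod): 'if mod:' is true iff mod is not None and nonzero
def polySubA (a b : List Int) : Option Int → List Int
  | none => subCore a b
  | some m => if m = 0 then subCore a b else (subCore a b).map (fun x => PySem.Int.mod x m)

-- the c of _poly_mul: scatter cyclic convolution c[(i+j)%n] += a[i]*b[j], skipping a[i]==0.
-- Python lists are arrays and c is mutated in place, so c is an Array threaded linearly.
-- Loop indices i, j of range(n) are Nat; (i+j)%n is always in range of c.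
-- ba.getD j 0 = b[j], exact when j < len b (guaranteed under Pre_; elsewhere Python raises IndexError).
def convAux (aa ba : Array Int) (n : Nat) : Array Int :=
  (List.range n).foldl (fun c i =>
      if aa.getD i 0 = 0 then c
      else (List.range n).foldl (fun c j =>
          c.setIfInBounds ((i + j) % n) (c.getD ((i + j) % n) 0 + aa.getD i 0 * ba.getD j 0)) c)
    (Array.replicate n 0)

def convA (a b : List Int) : List Int := (convAux a.toArray b.toArray a.length).toList

def polyMulA (a b : List Int) : Option Int → List Int
  | none => convA a b
  | some m => if m = 0 then convA a b else (convA a b).map (fun x => PySem.Int.mod x m)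

-- body of one iteration of A's while loop (mod' already = min(mod*mod, _Q));
-- two = [2] + [0]*(_N-1) with _N = 677 is inlined as 2 :: replicate 676 0
def stepA (f e : List Int) (mod' : Int) : List Int :=
  (polyMulA e (polySubA (2 :: List.replicate 676 0) (polyMulA f e (some mod')) (some mod'))
    (some mod')).map (fun x => PySem.Int.mod x mod')

-- the while loop 'while mod < _Q'; fuel 12 only makes the recursion structural:
-- mod squares from 2 and is capped at 2048, so at most 4 iterations ever run
def liftA (fuel : Nat) (f e : List Int) (mod : Int) : List Int :=
  match fuel with
  | 0 => e
  | fuel + 1 =>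
      if mod < 2048 then liftA fuel f (stepA f e (min (mod * mod) 2048)) (min (mod * mod) 2048)
      else e

def poly_inv_modq_py (f_inv2 : List Int) (f : List Int) : List Int :=
  liftA 12 f f_inv2 2

-- ===== PORT B =====
-- _padd: [(u[i] if i < len(u) else 0) + (v[i] if i < len(v) else 0) for i in range(max(len(u),len(v)))]
def padd (u v : List Int) : List Int :=
  (List.range (max u.length v.length)).map (fun i =>
    (if i < u.length then u.getD i 0 else 0) + (if i < v.length then v.getD i 0 else 0))

-- _psub, same shape with subtraction
def psub (u v : List Int) : List Int :=
  (List.range (max u.length v.length)).map (fun i =>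
    (if i < u.length then u.getD i 0 else 0) - (if i < v.length then v.getD i 0 else 0))

-- _school: guarded quadratic linear convolution in gather form
-- [sum(a[i]*b[k-i] for i in range(k+1) if i < la and k-i < lb) for k in range(la+lb-1)]
def school (a b : List Int) : List Int :=
  if a.length = 0 ∨ b.length = 0 then []
  else (List.range (a.length + b.length - 1)).map (fun k =>
    (((List.range (k + 1)).map (fun i =>
      if i < a.length ∧ k - i < b.length then a.getD i 0 * b.getD (k - i) 0 else 0))).sum)

-- _kara: Karatsuba on halves a[:h], a[h:] with h = min(la, lb)//2 (slices with
-- 0 ≤ h ≤ len are exactly take/drop), recombined by a guarded gather comprehension.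
-- The fuel argument (always ≥ len(a)+len(b), which shrinks at each recursive call)
-- only makes the recursion structural; it never changes the computation.
def karaF : Nat → List Int → List Int → List Int
  | 0, a, b => school a b
  | fuel + 1, a, b =>
    if a.length ≤ 32 ∨ b.length ≤ 32 then school a b
    else
      let h := min a.length b.length / 2
      let p0 := karaF fuel (a.take h) (b.take h)
      let p2 := karaF fuel (a.drop h) (b.drop h)
      let p1 := karaF fuel (padd (a.take h) (a.drop h)) (padd (b.take h) (b.drop h))
      let mid := psub (psub p1 p0) p2
      (List.range (a.length + b.length - 1)).map (fun k =>
        (if k < p0.length then p0.getD k 0 else 0)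
        + (if h ≤ k ∧ k < h + mid.length then mid.getD (k - h) 0 else 0)
        + (if 2 * h ≤ k ∧ k < 2 * h + p2.length then p2.getD (k - 2 * h) 0 else 0))

def kara (a b : List Int) : List Int := karaF (a.length + b.length) a b

-- _cyc: full Karatsuba product folded once around the ring degree, then reduced
def cyc (a b : List Int) (n : Nat) (m : Int) : List Int :=
  let c := kara a b
  (List.range n).map (fun k =>
    PySem.Int.mod ((if k < c.length then c.getD k 0 else 0)
      + (if k + n < c.length then c.getD (k + n) 0 else 0)) m)

-- t = [((2 if k == 0 else 0) - x) % m for k, x in enumerate(fe)]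
def tB (fe : List Int) (m : Int) : List Int :=
  (PySem.List.enumerate fe).map (fun p => PySem.Int.mod ((if p.1 = 0 then 2 else 0) - p.2) m)

def poly_inv_modq_py_alt (f_inv2 : List Int) (f : List Int) : List Int :=
  ([4, 16, 256, 2048] : List Int).foldl
    (fun e m => cyc e (tB (cyc f e f.length m) m) f.length m) f_inv2

-- ===== PRECONDITION & SPEC =====
-- Pre_ requires equal lengths, at most 677 (the ring degree N): on mismatched or longer inputs the
-- convolutions index out of range and A raises IndexError, except for degenerate all-zero inputs
-- where A's zero-skip never reaches the bad index and A still returns.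
def Pre_poly_inv_modq_py (f_inv2 : List Int) (f : List Int) : Prop :=
  f_inv2.length = f.length ∧ f.length ≤ 677
instance (f_inv2 : List Int) (f : List Int) : Decidable (Pre_poly_inv_modq_py f_inv2 f) := by
  unfold Pre_poly_inv_modq_py; infer_instance

def pvWitness_poly_inv_modq_py : List Int × List Int := ([1], [1])

def Spec_poly_inv_modq_py (f_inv2 : List Int) (f : List Int) (out : List Int) : Prop := out = poly_inv_modq_py_alt f_inv2 f
instance (f_inv2 : List Int) (f : List Int) (out : List Int) : Decidable (Spec_poly_inv_modq_py f_inv2 f out) := by unfold Spec_poly_inv_modq_py; infer_instance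

-- ===== CLAIM (what is proved, stated in full; the proofs are below) =====
def Claim_equal_poly_inv_modq_py : Prop := ∀ (f_inv2 : List Int) (f : List Int), Dom_poly_inv_modq_py f_inv2 f → Pre_poly_inv_modq_py f_inv2 f → Spec_poly_inv_modq_py f_inv2 f (poly_inv_modq_py f_inv2 f)

-- ===== LEMMAS AND PROOFS =====

-- modular-index facts (n is a variable, so omega alone cannot discharge these)
lemma addmod_char (n i j : Nat) (hi : i < n) (hj : j < n) :
    (i + j) % n = i + j ∨ (i + j) % n + n = i + j := by
  rcases Nat.lt_or_ge (i + j) n with h | h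
  · exact Or.inl (Nat.mod_eq_of_lt h)
  · right
    rw [Nat.mod_eq_sub_mod h, Nat.mod_eq_of_lt (by omega)]
    omega

lemma submod_char (n i k : Nat) (hi : i < n) (hk : k < n) :
    (k + n - i) % n = if i ≤ k then k - i else k + n - i := by
  split
  · next h =>
    have hrw : k + n - i = (k - i) + n := by omega
    rw [hrw, Nat.add_mod_right, Nat.mod_eq_of_lt (by omega)]
  · next h => exact Nat.mod_eq_of_lt (by omega)

lemma idx_cancel (n i k : Nat) (hi : i < n) (hk : k < n) :
    (i + (k + n - i) % n) % n = k := by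
  rw [submod_char n i k hi hk]
  split
  · next h =>
    have hrw : i + (k - i) = k := by omega
    rw [hrw, Nat.mod_eq_of_lt hk]
  · next h =>
    have hrw : i + (k + n - i) = k + n := by omega
    rw [hrw, Nat.add_mod_right, Nat.mod_eq_of_lt hk]

lemma idx_inj (n i j k : Nat) (hi : i < n) (hj : j < n) (hk : k < n) :
    (i + j) % n = k ↔ j = (k + n - i) % n := by
  constructor
  · intro h
    rcases addmod_char n i j hi hj with h' | h' <;>
      rw [submod_char n i k hi hk] <;> split <;> omega
  · intro h
    rw [h]; exact idx_cancel n i k hi hk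

lemma agetD_pos (xs : Array Int) (k : Nat) (h : k < xs.size) : xs.getD k 0 = xs[k] := by
  simp [Array.getD, h]

lemma agetD_set_lt (xs : Array Int) (p k : Nat) (x : Int) (hk : k < xs.size) :
    (xs.setIfInBounds p x).getD k 0 = if p = k then x else xs.getD k 0 := by
  by_cases hp : p = k
  · subst hp
    simp [Array.getD, hk]
  · simp [Array.getD, hk, hp]

lemma pymod_idem (x m : Int) (hm : 0 < m) :
    PySem.Int.mod (PySem.Int.mod x m) m = PySem.Int.mod x m := by
  simp only [PySem.Int.mod_eq_emod_of_pos hm]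
  exact Int.emod_emod_of_dvd _ dvd_rfl

lemma innerFold_size (v : Int) (ba : Array Int) (i n : Nat) :
    ∀ (js : List Nat) (c : Array Int),
      (js.foldl (fun c j =>
        c.setIfInBounds ((i + j) % n) (c.getD ((i + j) % n) 0 + v * ba.getD j 0)) c).size
        = c.size := by
  intro js
  induction js with
  | nil => intro c; rfl
  | cons j js ih => intro c; rw [List.foldl_cons, ih]; exact Array.size_setIfInBounds

lemma outerFold_size (aa ba : Array Int) (n : Nat) :
    ∀ (is : List Nat) (c : Array Int),
      (is.foldl (fun c i => if aa.getD i 0 = 0 then c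
          else (List.range n).foldl (fun c j =>
            c.setIfInBounds ((i + j) % n) (c.getD ((i + j) % n) 0 + aa.getD i 0 * ba.getD j 0)) c) c).size
        = c.size := by
  intro is
  induction is with
  | nil => intro c; rfl
  | cons i is ih =>
    intro c
    rw [List.foldl_cons, ih]
    split
    · rfl
    · exact innerFold_size _ ba i n (List.range n) c

lemma inner_getD (v : Int) (ba : Array Int) (n i : Nat) (hi : i < n) :
    ∀ (js : List Nat) (c : Array Int), c.size = n → (∀ j ∈ js, j < n) → js.Nodup →
      ∀ k, k < n →
      (js.foldl (fun c j =>
          c.setIfInBounds ((i + j) % n) (c.getD ((i + j) % n) 0 + v * ba.getD j 0)) c).getD k 0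
        = c.getD k 0 + (if (k + n - i) % n ∈ js then v * ba.getD ((k + n - i) % n) 0 else 0) := by
  intro js
  induction js with
  | nil => intro c _ _ _ k _; simp
  | cons j js ih =>
    intro c hc hjs hnd k hk
    have hj : j < n := hjs j (by simp)
    rw [List.foldl_cons,
        ih _ (by rw [Array.size_setIfInBounds, hc]) (fun x hx => hjs x (by simp [hx])) hnd.of_cons k hk,
        agetD_set_lt _ _ _ _ (by omega)]
    by_cases hcase : j = (k + n - i) % n
    · have hpk : (i + j) % n = k := (idx_inj n i j k hi hj hk).2 hcase
      have hnotmem : (k + n - i) % n ∉ js := hcase ▸ (List.nodup_cons.1 hnd).1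
      rw [if_pos hpk, if_neg hnotmem, if_pos (by simp [hcase]), hcase,
          idx_cancel n i k hi hk]
      ring
    · have hpk : (i + j) % n ≠ k := fun h => hcase ((idx_inj n i j k hi hj hk).1 h)
      have hmem : ((k + n - i) % n ∈ j :: js) ↔ ((k + n - i) % n ∈ js) := by
        simp only [List.mem_cons]
        constructor
        · rintro (h | h)
          · exact absurd h.symm hcase
          · exact h
        · exact Or.inr
      rw [if_neg hpk]
      simp only [hmem]

lemma outer_getD (aa ba : Array Int) (n : Nat) :
    ∀ (is : List Nat) (c : Array Int), c.size = n → (∀ i ∈ is, i < n) → ∀ k, k < n →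
      (is.foldl (fun c i => if aa.getD i 0 = 0 then c
          else (List.range n).foldl (fun c j =>
            c.setIfInBounds ((i + j) % n) (c.getD ((i + j) % n) 0 + aa.getD i 0 * ba.getD j 0)) c) c).getD k 0
        = c.getD k 0 + (is.map (fun i => aa.getD i 0 * ba.getD ((k + n - i) % n) 0)).sum := by
  intro is
  induction is with
  | nil => intro c _ _ k _; simp
  | cons i is ih =>
    intro c hc his k hk
    have hi : i < n := his i (by simp)
    rw [List.foldl_cons, List.map_cons, List.sum_cons]
    by_cases hz : aa.getD i 0 = 0
    · rw [if_pos hz, ih c hc (fun x hx => his x (by simp [hx])) k hk, hz]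
      ring
    · rw [if_neg hz,
          ih _ (by rw [innerFold_size, hc]) (fun x hx => his x (by simp [hx])) k hk,
          inner_getD (aa.getD i 0) ba n i hi (List.range n) c hc
            (fun x hx => List.mem_range.1 hx) (List.nodup_range) k hk,
          if_pos (List.mem_range.2 (Nat.mod_lt _ (by omega)))]
      ring

lemma polyMulA_some (a b : List Int) (m : Int) (hm : m ≠ 0) :
    polyMulA a b (some m) = (convA a b).map (fun x => PySem.Int.mod x m) := by
  simp only [polyMulA]
  rw [if_neg hm]

lemma polySubA_some (a b : List Int) (m : Int) (hm : m ≠ 0) :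
    polySubA a b (some m) = (subCore a b).map (fun x => PySem.Int.mod x m) := by
  simp only [polySubA]
  rw [if_neg hm]

lemma convAux_size (aa ba : Array Int) (n : Nat) : (convAux aa ba n).size = n := by
  unfold convAux
  rw [outerFold_size]
  exact Array.size_replicate

-- reference gather form of A's cyclic convolution (proof-side only)
def gatherAux (aa ba : Array Int) (n : Nat) (m : Int) : List Int :=
  (List.range n).map (fun k =>
    PySem.Int.mod (((List.range n).map (fun i => aa.getD i 0 * ba.getD ((k + n - i) % n) 0)).sum) m)

def gatherB (a b : List Int) (n : Nat) (m : Int) : List Int := gatherAux a.toArray b.toArray n m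

lemma gatherB_length (a b : List Int) (n : Nat) (m : Int) : (gatherB a b n m).length = n := by
  unfold gatherB gatherAux
  rw [List.length_map, List.length_range]

lemma mulA_eq (a b' : List Int) (m : Int) (hm : m ≠ 0) :
    polyMulA a b' (some m) = gatherB a b' a.length m := by
  rw [polyMulA_some a b' m hm]
  unfold convA gatherB gatherAux
  apply List.ext_getElem
  · rw [List.length_map, Array.length_toList, convAux_size, List.length_map, List.length_range]
  · intro k h1 h2
    have hk : k < a.length := by rwa [List.length_map, List.length_range] at h2
    rw [List.getElem_map, List.getElem_map, List.getElem_range, Array.getElem_toList]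
    congr 1
    rw [← agetD_pos (convAux a.toArray b'.toArray a.length) k (by rw [convAux_size]; exact hk)]
    unfold convAux
    rw [outer_getD a.toArray b'.toArray a.length (List.range a.length)
          (Array.replicate a.length 0) Array.size_replicate
          (fun x hx => List.mem_range.1 hx) k hk,
        agetD_pos _ _ (by rw [Array.size_replicate]; exact hk),
        Array.getElem_replicate]
    exact zero_add _

lemma subA_eq (fe : List Int) (m : Int) (hm : m ≠ 0) (hlen : fe.length ≤ 677) :
    polySubA (2 :: List.replicate 676 0) fe (some m) =
      (List.range fe.length).map (fun k =>
        PySem.Int.mod ((if k = 0 then 2 else 0) - fe.getD k 0) m) := by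
  rw [polySubA_some _ _ m hm]
  unfold subCore
  apply List.ext_getElem
  · simp only [List.length_map, List.length_zip, List.length_cons, List.length_replicate,
      List.length_range]
    omega
  · intro k h1 h2
    have hk : k < fe.length := by rwa [List.length_map, List.length_range] at h2
    have hkz : k < ((2 :: List.replicate 676 (0:Int)).zip fe).length := by
      rw [List.length_zip, List.length_cons, List.length_replicate]
      omega
    rw [List.getElem_map, List.getElem_map, List.getElem_map, List.getElem_range,
        List.getElem_zip]
    congr 1
    rw [List.getD_eq_getElem fe 0 hk]
    congr 1
    cases k with
    | zero => rw [List.getElem_cons_zero]; norm_num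
    | succ k =>
      rw [List.getElem_cons_succ, List.getElem_replicate]
      simp

lemma tB_eq (fe : List Int) (m : Int) :
    tB fe m = (List.range fe.length).map (fun k =>
      PySem.Int.mod ((if k = 0 then 2 else 0) - fe.getD k 0) m) := by
  unfold tB
  apply List.ext_getElem
  · rw [List.length_map, PySem.List.length_enumerate, List.length_map, List.length_range]
  · intro k h1 h2
    have hk : k < fe.length := by rwa [List.length_map, List.length_range] at h2
    rw [List.getElem_map, List.getElem_map, List.getElem_range,
        PySem.List.getElem_enumerate, List.getD_eq_getElem fe 0 hk]
    by_cases hk0 : k = 0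
    · subst hk0; norm_num
    · have hki : ¬((0:Int) + (k:Int) = 0) := by omega
      simp only [if_neg hki, if_neg hk0]

-- ===== B-side: linear-convolution coefficients and Karatsuba correctness =====

-- the k-th coefficient of the (untruncated) linear convolution
def Ccoef (a b : List Int) (k : Nat) : Int :=
  ∑ i ∈ Finset.range (k + 1), a.getD i 0 * b.getD (k - i) 0

def lc (a b : List Int) : List Int :=
  (List.range (a.length + b.length - 1)).map (fun k => Ccoef a b k)

lemma sum_map_range (n : Nat) (f : Nat → Int) :
    ((List.range n).map f).sum = ∑ i ∈ Finset.range n, f i := rfl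

lemma getD_map_range (L : Nat) (f : Nat → Int) (k : Nat) :
    ((List.range L).map f).getD k 0 = if k < L then f k else 0 := by
  by_cases h : k < L
  · rw [List.getD_eq_getElem _ _ (by simpa using h)]
    simp [h]
  · rw [List.getD_eq_default _ _ (by simpa using Nat.le_of_not_lt h)]
    simp [h]

lemma guard_getD (l : List Int) (k : Nat) :
    (if k < l.length then l.getD k 0 else 0) = l.getD k 0 := by
  by_cases h : k < l.length
  · rw [if_pos h]
  · rw [if_neg h, List.getD_eq_default _ _ (Nat.le_of_not_lt h)]

lemma getD_padd (u v : List Int) (k : Nat) :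
    (padd u v).getD k 0 = u.getD k 0 + v.getD k 0 := by
  unfold padd
  rw [getD_map_range]
  split
  · next h => rw [guard_getD, guard_getD]
  · next h =>
    rw [List.getD_eq_default u _ (by omega), List.getD_eq_default v _ (by omega)]
    norm_num

lemma getD_psub (u v : List Int) (k : Nat) :
    (psub u v).getD k 0 = u.getD k 0 - v.getD k 0 := by
  unfold psub
  rw [getD_map_range]
  split
  · next h => rw [guard_getD, guard_getD]
  · next h =>
    rw [List.getD_eq_default u _ (by omega), List.getD_eq_default v _ (by omega)]
    norm_num

lemma length_padd (u v : List Int) : (padd u v).length = max u.length v.length := by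
  simp [padd]

lemma length_psub (u v : List Int) : (psub u v).length = max u.length v.length := by
  simp [psub]

lemma length_lc (a b : List Int) : (lc a b).length = a.length + b.length - 1 := by
  simp [lc]

lemma C_vanish (a b : List Int) (k : Nat) (h : a.length + b.length ≤ k + 1) :
    Ccoef a b k = 0 := by
  unfold Ccoef
  apply Finset.sum_eq_zero
  intro i hi
  have hik : i < k + 1 := Finset.mem_range.1 hi
  rcases Nat.lt_or_ge i a.length with h1 | h1
  · rw [List.getD_eq_default b _ (by omega)]
    ring
  · rw [List.getD_eq_default a _ h1]
    ring

lemma C_comm (a b : List Int) (k : Nat) : Ccoef a b k = Ccoef b a k := by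
  unfold Ccoef
  conv_rhs => rw [← Finset.sum_range_reflect]
  apply Finset.sum_congr rfl
  intro i hi
  have hik : i < k + 1 := Finset.mem_range.1 hi
  have h1 : k + 1 - 1 - i = k - i := by omega
  have h2 : k - (k - i) = i := by omega
  rw [h1, h2, mul_comm]

lemma getD_append_lt (x y : List Int) (i : Nat) (h : i < x.length) :
    (x ++ y).getD i 0 = x.getD i 0 := by
  rw [List.getD_eq_getElem _ _ (by simp; omega), List.getD_eq_getElem _ _ h]
  exact List.getElem_append_left h

lemma getD_append_ge (x y : List Int) (i : Nat) (h : x.length ≤ i) :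
    (x ++ y).getD i 0 = y.getD (i - x.length) 0 := by
  by_cases h2 : i < x.length + y.length
  · rw [List.getD_eq_getElem _ _ (by simp; omega), List.getD_eq_getElem _ _ (by omega)]
    exact List.getElem_append_right h
  · rw [List.getD_eq_default _ _ (by simp; omega), List.getD_eq_default _ _ (by omega)]

lemma C_append_left (x y b : List Int) (k : Nat) :
    Ccoef (x ++ y) b k
      = Ccoef x b k + (if x.length ≤ k then Ccoef y b (k - x.length) else 0) := by
  unfold Ccoef
  by_cases hk : x.length ≤ k
  · rw [if_pos hk]
    have hsplit :
        ∑ i ∈ Finset.range (k + 1), (x ++ y).getD i 0 * b.getD (k - i) 0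
          = (∑ i ∈ Finset.Ico 0 x.length, (x ++ y).getD i 0 * b.getD (k - i) 0)
            + ∑ i ∈ Finset.Ico x.length (k + 1), (x ++ y).getD i 0 * b.getD (k - i) 0 := by
      rw [Finset.range_eq_Ico,
          Finset.sum_Ico_consecutive _ (Nat.zero_le _) (by omega)]
    have hxsplit :
        ∑ i ∈ Finset.range (k + 1), x.getD i 0 * b.getD (k - i) 0
          = (∑ i ∈ Finset.Ico 0 x.length, x.getD i 0 * b.getD (k - i) 0)
            + ∑ i ∈ Finset.Ico x.length (k + 1), x.getD i 0 * b.getD (k - i) 0 := by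
      rw [Finset.range_eq_Ico,
          Finset.sum_Ico_consecutive _ (Nat.zero_le _) (by omega)]
    rw [hsplit, hxsplit]
    have h1 : ∑ i ∈ Finset.Ico 0 x.length, (x ++ y).getD i 0 * b.getD (k - i) 0
        = ∑ i ∈ Finset.Ico 0 x.length, x.getD i 0 * b.getD (k - i) 0 := by
      apply Finset.sum_congr rfl
      intro i hi
      rw [getD_append_lt x y i (Finset.mem_Ico.1 hi).2]
    have h2 : ∑ i ∈ Finset.Ico x.length (k + 1), x.getD i 0 * b.getD (k - i) 0 = 0 := by
      apply Finset.sum_eq_zero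
      intro i hi
      rw [List.getD_eq_default x _ (Finset.mem_Ico.1 hi).1]
      ring
    have h3 : ∑ i ∈ Finset.Ico x.length (k + 1), (x ++ y).getD i 0 * b.getD (k - i) 0
        = ∑ i ∈ Finset.range (k - x.length + 1), y.getD i 0 * b.getD (k - x.length - i) 0 := by
      rw [Finset.sum_Ico_eq_sum_range]
      have hlen : k + 1 - x.length = k - x.length + 1 := by omega
      rw [hlen]
      apply Finset.sum_congr rfl
      intro i hi
      rw [getD_append_ge x y (x.length + i) (by omega)]
      have e2 : x.length + i - x.length = i := by omega
      have e3 : k - (x.length + i) = k - x.length - i := by omega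
      rw [e2, e3]
    rw [h1, h2, h3]
    ring
  · rw [if_neg hk, add_zero]
    apply Finset.sum_congr rfl
    intro i hi
    have hik : i < k + 1 := Finset.mem_range.1 hi
    rw [getD_append_lt x y i (by omega)]

lemma C_append_right (a u v : List Int) (k : Nat) :
    Ccoef a (u ++ v) k
      = Ccoef a u k + (if u.length ≤ k then Ccoef a v (k - u.length) else 0) := by
  rw [C_comm, C_append_left, C_comm u a]
  congr 1
  split
  · rw [C_comm]
  · rfl

lemma C_padd_left (u v b : List Int) (k : Nat) :
    Ccoef (padd u v) b k = Ccoef u b k + Ccoef v b k := by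
  unfold Ccoef
  rw [← Finset.sum_add_distrib]
  apply Finset.sum_congr rfl
  intro i _
  rw [getD_padd]
  ring

lemma C_padd_right (a u v : List Int) (k : Nat) :
    Ccoef a (padd u v) k = Ccoef a u k + Ccoef a v k := by
  rw [C_comm, C_padd_left, C_comm u a, C_comm v a]

lemma C_split (x y u v : List Int) (k h : Nat) (hx : x.length = h) (hu : u.length = h) :
    Ccoef (x ++ y) (u ++ v) k
      = Ccoef x u k
        + (if h ≤ k then Ccoef x v (k - h) + Ccoef y u (k - h) else 0)
        + (if 2 * h ≤ k then Ccoef y v (k - 2 * h) else 0) := by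
  rw [C_append_left, hx, C_append_right, hu]
  by_cases h1 : h ≤ k
  · rw [if_pos h1, if_pos h1, if_pos h1, C_append_right, hu]
    by_cases h2 : 2 * h ≤ k
    · rw [if_pos (show h ≤ k - h by omega), if_pos h2]
      have e1 : k - h - h = k - 2 * h := by omega
      rw [e1]
      ring
    · rw [if_neg (show ¬ h ≤ k - h by omega), if_neg h2]
      ring
  · have h2 : ¬ 2 * h ≤ k := by omega
    simp only [if_neg h1, if_neg h2]

lemma school_eq (a b : List Int) (ha : a.length ≠ 0) (hb : b.length ≠ 0) :
    school a b = lc a b := by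
  unfold school lc
  rw [if_neg (by omega)]
  apply List.map_congr_left
  intro k _
  rw [sum_map_range]
  unfold Ccoef
  apply Finset.sum_congr rfl
  intro i hi
  have hik : i < k + 1 := Finset.mem_range.1 hi
  split
  · rfl
  · next hcon =>
    push_neg at hcon
    by_cases h1 : i < a.length
    · rw [List.getD_eq_default b _ (hcon h1)]
      ring
    · rw [List.getD_eq_default a _ (by omega)]
      ring

lemma getD_lc (a b : List Int) (k : Nat) (ha : a.length ≠ 0) (hb : b.length ≠ 0) :
    (lc a b).getD k 0 = Ccoef a b k := by
  unfold lc
  rw [getD_map_range]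
  split
  · rfl
  · next h => exact (C_vanish a b k (by omega)).symm

set_option maxHeartbeats 2000000 in
lemma karaF_eq (fuel : Nat) : ∀ (a b : List Int), a.length + b.length ≤ fuel →
    karaF fuel a b = school a b := by
  induction fuel with
  | zero => intro a b hab; rfl
  | succ fuel ih =>
  intro a b hab
  simp only [karaF]
  split
  · rfl
  next hbase =>
    push_neg at hbase
    obtain ⟨ha32, hb32⟩ := hbase
    generalize hH : min a.length b.length / 2 = h
    have hh16 : 16 ≤ h := by omega
    have hhla : h < a.length := by omega
    have hhlb : h < b.length := by omega
    have h2la : 2 * h ≤ a.length := by omega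
    have h2lb : 2 * h ≤ b.length := by omega
    set a0 := a.take h with ha0d
    set a1 := a.drop h with ha1d
    set b0 := b.take h with hb0d
    set b1 := b.drop h with hb1d
    have hla0 : a0.length = h := by rw [ha0d, List.length_take]; omega
    have hla1 : a1.length = a.length - h := by rw [ha1d, List.length_drop]
    have hlb0 : b0.length = h := by rw [hb0d, List.length_take]; omega
    have hlb1 : b1.length = b.length - h := by rw [hb1d, List.length_drop]
    have hpa : (padd a0 a1).length = a.length - h := by
      rw [length_padd, hla0, hla1]; omega
    have hpb : (padd b0 b1).length = b.length - h := by
      rw [length_padd, hlb0, hlb1]; omega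
    have e0 : karaF fuel a0 b0 = lc a0 b0 := by
      rw [ih a0 b0 (by omega),
          school_eq a0 b0 (by omega) (by omega)]
    have e2 : karaF fuel a1 b1 = lc a1 b1 := by
      rw [ih a1 b1 (by omega),
          school_eq a1 b1 (by omega) (by omega)]
    have e1 : karaF fuel (padd a0 a1) (padd b0 b1) = lc (padd a0 a1) (padd b0 b1) := by
      rw [ih (padd a0 a1) (padd b0 b1) (by omega),
          school_eq _ _ (by omega) (by omega)]
    rw [e0, e2, e1, school_eq a b (by omega) (by omega)]
    have hM : (psub (psub (lc (padd a0 a1) (padd b0 b1)) (lc a0 b0)) (lc a1 b1)).length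
        = a.length + b.length - 2 * h - 1 := by
      rw [length_psub, length_psub, length_lc, length_lc, length_lc,
          hpa, hpb, hla0, hlb0, hla1, hlb1]
      omega
    have hP : (lc a1 b1).length = a.length + b.length - 2 * h - 1 := by
      rw [length_lc, hla1, hlb1]; omega
    apply List.ext_getElem
    · rw [List.length_map, List.length_range, length_lc]
    · intro k h1 h2
      have hk : k < a.length + b.length - 1 := by
        rwa [List.length_map, List.length_range] at h1
      rw [List.getElem_map, List.getElem_range, ← List.getD_eq_getElem (lc a b) 0 h2,
          getD_lc a b k (by omega) (by omega)]
      -- expand the three guarded accesses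
      rw [guard_getD, getD_lc a0 b0 k (by omega) (by omega)]
      rw [getD_psub, getD_psub, getD_lc (padd a0 a1) (padd b0 b1) (k - h) (by omega) (by omega),
          getD_lc a0 b0 _ (by omega) (by omega), getD_lc a1 b1 _ (by omega) (by omega),
          getD_lc a1 b1 _ (by omega) (by omega),
          C_padd_left, C_padd_right, C_padd_right]
      -- right-hand side: split a and b
      conv_rhs => rw [← List.take_append_drop h a, ← List.take_append_drop h b]
      rw [← ha0d, ← ha1d, ← hb0d, ← hb1d, C_split a0 a1 b0 b1 k h hla0 hlb0]
      rw [hM, hP]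
      have hub3 : 2 * h + (a.length + b.length - 2 * h - 1) = a.length + b.length - 1 := by omega
      rw [hub3]
      by_cases hc : h ≤ k
      · by_cases hd : k < h + (a.length + b.length - 2 * h - 1)
        · rw [if_pos (And.intro hc hd), if_pos hc]
          by_cases he : 2 * h ≤ k
          · rw [if_pos (And.intro he hk), if_pos he]
            ring
          · rw [if_neg (fun hcon => he hcon.1), if_neg he]
            ring
        · rw [if_neg (fun hcon => hd hcon.2), if_pos hc,
              C_vanish a0 b1 (k - h) (by omega), C_vanish a1 b0 (k - h) (by omega)]
          by_cases he : 2 * h ≤ k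
          · rw [if_pos (And.intro he hk), if_pos he]
            ring
          · rw [if_neg (fun hcon => he hcon.1), if_neg he]
            ring
      · have he : ¬ 2 * h ≤ k := by omega
        rw [if_neg (fun hcon => hc hcon.1), if_neg hc,
            if_neg (fun hcon => he hcon.1), if_neg he]

lemma kara_eq (a b : List Int) : kara a b = school a b :=
  karaF_eq (a.length + b.length) a b le_rfl

-- ===== linking the cyclic fold to the gather convolution =====

lemma toArray_getD (l : List Int) (i : Nat) : l.toArray.getD i 0 = l.getD i 0 := by
  by_cases h : i < l.length
  · rw [agetD_pos _ _ (by simpa using h), List.getD_eq_getElem _ _ h]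
    simp
  · rw [List.getD_eq_default _ _ (by omega)]
    simp [Array.getD]
    omega

lemma cycC (a b : List Int) (n k : Nat) (ha : a.length = n) (hb : b.length = n) (hk : k < n) :
    ∑ i ∈ Finset.range n, a.getD i 0 * b.getD ((k + n - i) % n) 0
      = Ccoef a b k + Ccoef a b (k + n) := by
  have key1 : ∑ i ∈ Finset.Ico 0 (k + 1), a.getD i 0 * b.getD ((k + n - i) % n) 0
      = Ccoef a b k := by
    unfold Ccoef
    rw [← Finset.range_eq_Ico]
    apply Finset.sum_congr rfl
    intro i hi
    have hik : i < k + 1 := Finset.mem_range.1 hi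
    rw [submod_char n i k (by omega) hk, if_pos (by omega)]
  have key2 : ∑ i ∈ Finset.Ico (k + 1) n, a.getD i 0 * b.getD ((k + n - i) % n) 0
      = ∑ i ∈ Finset.Ico (k + 1) n, a.getD i 0 * b.getD (k + n - i) 0 := by
    apply Finset.sum_congr rfl
    intro i hi
    obtain ⟨hi1, hi2⟩ := Finset.mem_Ico.1 hi
    rw [submod_char n i k hi2 hk, if_neg (by omega)]
  have key3 : Ccoef a b (k + n)
      = ∑ i ∈ Finset.Ico (k + 1) n, a.getD i 0 * b.getD (k + n - i) 0 := by
    unfold Ccoef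
    rw [Finset.range_eq_Ico,
        ← Finset.sum_Ico_consecutive _ (Nat.zero_le (k + 1)) (show k + 1 ≤ k + n + 1 by omega),
        ← Finset.sum_Ico_consecutive _ (show k + 1 ≤ n by omega) (show n ≤ k + n + 1 by omega)]
    have z1 : ∑ i ∈ Finset.Ico 0 (k + 1), a.getD i 0 * b.getD (k + n - i) 0 = 0 :=
      Finset.sum_eq_zero (fun i hi => by
        rw [List.getD_eq_default b _ (by have := (Finset.mem_Ico.1 hi).2; omega)]; ring)
    have z3 : ∑ i ∈ Finset.Ico n (k + n + 1), a.getD i 0 * b.getD (k + n - i) 0 = 0 :=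
      Finset.sum_eq_zero (fun i hi => by
        rw [List.getD_eq_default a _ (by have := (Finset.mem_Ico.1 hi).1; omega)]; ring)
    rw [z1, z3]
    ring
  rw [Finset.range_eq_Ico,
      ← Finset.sum_Ico_consecutive _ (Nat.zero_le (k + 1)) (show k + 1 ≤ n by omega),
      key1, key2, ← key3]

lemma length_cyc (a b : List Int) (n : Nat) (m : Int) : (cyc a b n m).length = n := by
  simp [cyc]

lemma length_tB (fe : List Int) (m : Int) : (tB fe m).length = fe.length := by
  simp [tB, PySem.List.length_enumerate]

lemma cyc_eq_gather (a b : List Int) (n : Nat) (m : Int)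
    (ha : a.length = n) (hb : b.length = n) :
    cyc a b n m = gatherB a b n m := by
  unfold cyc gatherB gatherAux
  simp only []
  apply List.map_congr_left
  intro k hkm
  have hk : k < n := List.mem_range.1 hkm
  congr 1
  rw [kara_eq, school_eq a b (by omega) (by omega), guard_getD, guard_getD,
      getD_lc a b k (by omega) (by omega), getD_lc a b (k + n) (by omega) (by omega),
      sum_map_range]
  have hterm : ∑ i ∈ Finset.range n, a.toArray.getD i 0 * b.toArray.getD ((k + n - i) % n) 0
      = ∑ i ∈ Finset.range n, a.getD i 0 * b.getD ((k + n - i) % n) 0 :=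
    Finset.sum_congr rfl (fun i _ => by rw [toArray_getD, toArray_getD])
  rw [hterm, cycC a b n k ha hb hk]

lemma step_eq (f e : List Int) (m : Int) (he : e.length = f.length)
    (hle : f.length ≤ 677) (hm : 0 < m) :
    stepA f e m = cyc e (tB (cyc f e f.length m) m) f.length m := by
  have hm' : m ≠ 0 := hm.ne'
  rw [cyc_eq_gather f e f.length m rfl he,
      cyc_eq_gather e (tB (gatherB f e f.length m) m) f.length m he
        (by rw [length_tB, gatherB_length])]
  unfold stepA
  rw [mulA_eq f e m hm',
      subA_eq (gatherB f e f.length m) m hm' (by rw [gatherB_length]; exact hle),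
      tB_eq (gatherB f e f.length m) m, gatherB_length,
      mulA_eq e _ m hm', he]
  unfold gatherB gatherAux
  rw [List.map_map]
  apply List.map_congr_left
  intro k _
  simp only [Function.comp_apply]
  exact pymod_idem _ m hm

lemma liftA_step (fuel : Nat) (f e : List Int) (mod mod' : Int) (h : mod < 2048)
    (h' : min (mod * mod) 2048 = mod') :
    liftA (fuel + 1) f e mod = liftA fuel f (stepA f e mod') mod' := by
  subst h'; simp [liftA, h]

lemma liftA_stop (fuel : Nat) (f e : List Int) (mod : Int) (h : ¬ mod < 2048) :
    liftA fuel f e mod = e := by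
  cases fuel <;> simp [liftA, h]

-- ===== VERDICT (by name: the statement is the Claim_ definition above) =====
theorem poly_inv_modq_py_spec : Claim_equal_poly_inv_modq_py := by
  intro f_inv2 f _ hpre
  obtain ⟨hlen, hle⟩ := hpre
  unfold Spec_poly_inv_modq_py poly_inv_modq_py poly_inv_modq_py_alt
  simp only [List.foldl_cons, List.foldl_nil]
  rw [show liftA 12 f f_inv2 2 = liftA 11 f (stepA f f_inv2 4) 4 from
        liftA_step 11 f f_inv2 2 4 (by norm_num) (by norm_num),
      show liftA 11 f (stepA f f_inv2 4) 4
          = liftA 10 f (stepA f (stepA f f_inv2 4) 16) 16 from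
        liftA_step 10 f _ 4 16 (by norm_num) (by norm_num),
      show liftA 10 f (stepA f (stepA f f_inv2 4) 16) 16
          = liftA 9 f (stepA f (stepA f (stepA f f_inv2 4) 16) 256) 256 from
        liftA_step 9 f _ 16 256 (by norm_num) (by norm_num),
      show liftA 9 f (stepA f (stepA f (stepA f f_inv2 4) 16) 256) 256
          = liftA 8 f (stepA f (stepA f (stepA f (stepA f f_inv2 4) 16) 256) 2048) 2048 from
        liftA_step 8 f _ 256 2048 (by norm_num) (by norm_num),
      liftA_stop 8 f _ 2048 (by norm_num)]
  rw [step_eq f f_inv2 4 hlen hle (by norm_num),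
      step_eq f _ 16 (by rw [length_cyc]) hle (by norm_num),
      step_eq f _ 256 (by rw [length_cyc]) hle (by norm_num),
      step_eq f _ 2048 (by rw [length_cyc]) hle (by norm_num)]
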